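-- pv_equiv track=rewrite | github.com/MrHamdulay/csc3-capstone | examples/data/Assignment_7/hsnnas006/util.py | check_lost
-- ===== SOURCE A (Python) =====
-- def check_lost(grid):
--     '''return True if there are no 0 values and no adjacent values that are equal; otherwise False'''
--     for col in range(4):
--         for row in range(4):
--             if grid[col][row] == 0: #if there is a zero in grid
--                 return False
--             if (row-1) != -1: #make sure there is a row above
--                 if grid[col][row] == grid[col][row-1]:
--                     return False
--             if (row+1) != 4: #make sure there is a row below
--                 if grid[col][row] == grid[col][row+1]:
--                     return False
--             if (col-1) != -1: #make sure there is a column to the left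
--                 if grid[col][row] == grid[col-1][row]:
--                     return False
--             if (col+1) != 4: #make sure there is a column to the right
--                 if grid[col][row] == grid[col+1][row]:
--                     return False
--     else:
--         return True
-- ===== SOURCE B (Python) =====
-- def check_lost(grid):
--     '''return True if there are no 0 values and no adjacent values that are equal; otherwise False'''
--     def scan(i):
--         if i >= 16:
--             return True
--         if grid[i//4][i%4] == 0:
--             return False
--         if i%4 < 3 and grid[i//4][i%4] == grid[i//4][i%4 + 1]:
--             return False
--         if i//4 < 3 and grid[i//4][i%4] == grid[i//4 + 1][i%4]:
--             return False
--         return scan(i + 1)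
--     return scan(0)
-- ===== Notes on version B (the rewrite author's own statement) =====
-- stated objective: simpler
-- what changed: Flattens A's nested 4x4 loop into a single recursion over the flattened cell index and tests each adjacent pair once, forward only (down/right), dropping A's redundant backward (up/left) comparisons and their boundary guards.
import Mathlib
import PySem

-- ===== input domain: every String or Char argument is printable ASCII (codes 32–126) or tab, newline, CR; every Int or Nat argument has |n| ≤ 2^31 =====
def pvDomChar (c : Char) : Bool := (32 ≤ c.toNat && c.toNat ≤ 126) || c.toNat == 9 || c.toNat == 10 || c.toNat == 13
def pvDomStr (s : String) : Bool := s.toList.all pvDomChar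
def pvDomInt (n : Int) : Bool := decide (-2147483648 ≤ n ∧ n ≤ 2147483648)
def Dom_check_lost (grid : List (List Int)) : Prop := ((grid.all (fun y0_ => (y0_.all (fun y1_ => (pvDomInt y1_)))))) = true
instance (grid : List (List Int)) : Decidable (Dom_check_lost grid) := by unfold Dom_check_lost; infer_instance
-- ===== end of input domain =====

-- B flattens A's nested loop into one recursion over the cell index and checks each adjacent pair
-- once, forward only (down/right), dropping A's redundant backward comparisons and their guards.

-- ===== PORT A =====
-- grid[col][row]; the default 0 of pyGetD is unreachable under Pre_ wherever it influences the result
def pvCellA (grid : List (List Int)) (c r : Int) : Int :=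
  PySem.List.pyGetD (PySem.List.pyGetD grid c []) r 0

def check_lost (grid : List (List Int)) : Bool :=
  !((PySem.List.pyRange 0 4 1).any (fun col =>
     (PySem.List.pyRange 0 4 1).any (fun row =>
       pvCellA grid col row == 0
       || (decide (row - 1 ≠ -1) && pvCellA grid col row == pvCellA grid col (row - 1))
       || (decide (row + 1 ≠ 4) && pvCellA grid col row == pvCellA grid col (row + 1))
       || (decide (col - 1 ≠ -1) && pvCellA grid col row == pvCellA grid (col - 1) row)
       || (decide (col + 1 ≠ 4) && pvCellA grid col row == pvCellA grid (col + 1) row))))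

-- ===== PORT B =====
-- grid[col][row] of Source B; same unreachable default as A's port
def pvCellB (grid : List (List Int)) (c r : Nat) : Int :=
  PySem.List.pyGetD (PySem.List.pyGetD grid (c : Int) []) (r : Int) 0

-- scan(i) of Source B: one cell per call, recursing on i+1
def pvScan (grid : List (List Int)) (i : Nat) : Bool :=
  if 16 ≤ i then true
  else if pvCellB grid (i/4) (i%4) == 0 then false
  else if decide (i%4 < 3) && pvCellB grid (i/4) (i%4) == pvCellB grid (i/4) (i%4 + 1) then false
  else if decide (i/4 < 3) && pvCellB grid (i/4) (i%4) == pvCellB grid (i/4 + 1) (i%4) then false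
  else pvScan grid (i + 1)
termination_by 16 - i
decreasing_by omega

def check_lost_alt (grid : List (List Int)) : Bool := pvScan grid 0

-- ===== PRECONDITION & SPEC =====
-- Pre_ is exactly the set of inputs on which A returns normally: either the grid has a full 4x4
-- region (the board A is written for, where its scan completes), or A's column-major scan reaches
-- a cell whose zero/adjacent-equality test fires before any out-of-range access (all earlier cells
-- have their three possible accesses in range).
def pvE (grid : List (List Int)) (c r : Nat) : Prop :=
  c < grid.length ∧ r < (grid.getD c []).length

def pvG (grid : List (List Int)) (c r : Nat) : Int := (grid.getD c []).getD r 0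

-- cell (c,r) makes A return False before any of its own risky accesses can raise
def pvCellReturns (grid : List (List Int)) (c r : Nat) : Prop :=
  pvE grid c r ∧
  (pvG grid c r = 0
   ∨ (0 < r ∧ pvG grid c r = pvG grid c (r-1))
   ∨ ((r = 3 ∨ pvE grid c (r+1)) ∧
      ((r < 3 ∧ pvG grid c r = pvG grid c (r+1))
       ∨ (0 < c ∧ pvG grid c r = pvG grid (c-1) r)
       ∨ (c < 3 ∧ pvE grid (c+1) r ∧ pvG grid c r = pvG grid (c+1) r))))

-- all accesses cell (c,r) can make are in range
def pvCellCompletes (grid : List (List Int)) (c r : Nat) : Prop :=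
  pvE grid c r ∧ (r = 3 ∨ pvE grid c (r+1)) ∧ (c = 3 ∨ pvE grid (c+1) r)

def Pre_check_lost (grid : List (List Int)) : Prop :=
  (4 ≤ grid.length ∧ ∀ c < 4, 4 ≤ (grid.getD c []).length)
  ∨ (∃ c < 4, ∃ r < 4, pvCellReturns grid c r ∧
      ∀ c' < 4, ∀ r' < 4, 4*c'+r' < 4*c+r → pvCellCompletes grid c' r')
instance (grid : List (List Int)) : Decidable (Pre_check_lost grid) := by
  unfold Pre_check_lost
  haveI i1 : ∀ c r, Decidable (pvCellReturns grid c r) := fun c r => by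
    unfold pvCellReturns pvE pvG; infer_instance
  haveI i2 : ∀ c r, Decidable (pvCellCompletes grid c r) := fun c r => by
    unfold pvCellCompletes pvE; infer_instance
  infer_instance
def pvWitness_check_lost : List (List Int) :=
  [[1,2,1,2],[2,1,2,1],[1,2,1,2],[2,1,2,1]]

def Spec_check_lost (grid : List (List Int)) (out : Bool) : Prop := out = check_lost_alt grid
instance (grid : List (List Int)) (out : Bool) : Decidable (Spec_check_lost grid out) := by unfold Spec_check_lost; infer_instance

-- ===== CLAIM (what is proved, stated in full; the proofs are below) =====
def Claim_equal_check_lost : Prop := ∀ (grid : List (List Int)), Dom_check_lost grid → Pre_check_lost grid → Spec_check_lost grid (check_lost grid)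

-- ===== LEMMAS AND PROOFS =====

-- the forward trigger at cell (c,r): a zero, or an equal pair downward or rightward
def pvQ (grid : List (List Int)) (c r : Nat) : Prop :=
  pvG grid c r = 0
  ∨ (r < 3 ∧ pvG grid c r = pvG grid c (r+1))
  ∨ (c < 3 ∧ pvG grid c r = pvG grid (c+1) r)

theorem pv_cellA (grid : List (List Int)) (c r : Nat) :
    pvCellA grid (c : Int) (r : Int) = pvG grid c r := by
  simp [pvCellA, pvG, PySem.List.pyGetD_natCast]

theorem pv_cellB (grid : List (List Int)) (c r : Nat) :
    pvCellB grid c r = pvG grid c r := by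
  simp [pvCellB, pvG, PySem.List.pyGetD_natCast]

-- characterization of B's scan: it returns false iff some not-yet-visited cell fires
theorem pv_scan_false (grid : List (List Int)) :
    ∀ n i, 16 - i ≤ n →
      (pvScan grid i = false ↔ ∃ j, i ≤ j ∧ j < 16 ∧ pvQ grid (j/4) (j%4)) := by
  intro n
  induction n with
  | zero =>
    intro i hi
    rw [pvScan]
    simp only [if_pos (by omega : 16 ≤ i)]
    constructor
    · intro h; exact absurd h (by decide)
    · rintro ⟨j, hij, hj, _⟩; omega
  | succ n ih =>
    intro i hi
    by_cases h16 : 16 ≤ i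
    · rw [pvScan]
      simp only [if_pos h16]
      constructor
      · intro h; exact absurd h (by decide)
      · rintro ⟨j, hij, hj, _⟩; omega
    · rw [pvScan]
      simp only [if_neg h16]
      simp only [pv_cellB]
      by_cases hz : pvG grid (i/4) (i%4) = 0
      · rw [if_pos (by simpa using hz : (pvG grid (i/4) (i%4) == 0) = true)]
        exact ⟨fun _ => ⟨i, le_refl i, by omega, Or.inl hz⟩, fun _ => rfl⟩
      · rw [if_neg (by simpa using hz)]
        by_cases hd : i % 4 < 3 ∧ pvG grid (i/4) (i%4) = pvG grid (i/4) (i%4 + 1)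
        · rw [if_pos (by simp [hd.1, hd.2])]
          exact ⟨fun _ => ⟨i, le_refl i, by omega, Or.inr (Or.inl hd)⟩, fun _ => rfl⟩
        · rw [if_neg (by simpa using fun h1 h2 => hd ⟨h1, by simpa using h2⟩)]
          by_cases hr : i / 4 < 3 ∧ pvG grid (i/4) (i%4) = pvG grid (i/4 + 1) (i%4)
          · rw [if_pos (by simp [hr.1, hr.2])]
            exact ⟨fun _ => ⟨i, le_refl i, by omega, Or.inr (Or.inr hr)⟩, fun _ => rfl⟩
          · rw [if_neg (by simpa using fun h1 h2 => hr ⟨h1, by simpa using h2⟩)]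
            rw [ih (i+1) (by omega)]
            constructor
            · rintro ⟨j, hij, hj, hq⟩; exact ⟨j, by omega, hj, hq⟩
            · rintro ⟨j, hij, hj, hq⟩
              refine ⟨j, by_contra fun hc => ?_, hj, hq⟩
              have hji : j = i := by omega
              subst hji
              rcases hq with h | h | h
              · exact hz h
              · exact hd h
              · exact hr h

-- characterization of A's scan: false iff some cell of the 4x4 region fires forward
theorem pv_A_false_iff (grid : List (List Int)) :
    check_lost grid = false ↔ ∃ c, c < 4 ∧ ∃ r, r < 4 ∧ pvQ grid c r := by
  unfold check_lost
  simp only [Bool.not_eq_false', List.any_eq_true]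
  constructor
  · rintro ⟨col, hcol, row, hrow, hp⟩
    rw [PySem.List.mem_pyRange_one] at hcol hrow
    obtain ⟨c, rfl⟩ : ∃ c : Nat, (c : Int) = col := ⟨col.toNat, by omega⟩
    obtain ⟨r, rfl⟩ : ∃ r : Nat, (r : Int) = row := ⟨row.toNat, by omega⟩
    have hc4 : c < 4 := by omega
    have hr4 : r < 4 := by omega
    simp only [Bool.or_eq_true, Bool.and_eq_true, beq_iff_eq, decide_eq_true_eq,
      pv_cellA] at hp
    rcases hp with ((((hz | ⟨hg, hu⟩) | ⟨hg, hd⟩) | ⟨hg, hl⟩) | ⟨hg, hrt⟩)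
    · exact ⟨c, hc4, r, hr4, Or.inl hz⟩
    · -- up pair, seen forward from (c, r-1)
      have hr1 : 0 < r := by omega
      refine ⟨c, hc4, r-1, by omega, Or.inr (Or.inl ⟨by omega, ?_⟩)⟩
      have he : (r:Int) - 1 = ((r-1 : Nat) : Int) := by omega
      rw [he, pv_cellA] at hu
      have he2 : r - 1 + 1 = r := by omega
      rw [he2]; exact hu.symm
    · refine ⟨c, hc4, r, hr4, Or.inr (Or.inl ⟨by omega, ?_⟩)⟩
      have he : (r:Int) + 1 = ((r+1 : Nat) : Int) := by omega
      rw [he, pv_cellA] at hd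
      exact hd
    · -- left pair, seen forward from (c-1, r)
      have hc1 : 0 < c := by omega
      refine ⟨c-1, by omega, r, hr4, Or.inr (Or.inr ⟨by omega, ?_⟩)⟩
      have he : (c:Int) - 1 = ((c-1 : Nat) : Int) := by omega
      rw [he, pv_cellA] at hl
      have he2 : c - 1 + 1 = c := by omega
      rw [he2]; exact hl.symm
    · refine ⟨c, hc4, r, hr4, Or.inr (Or.inr ⟨by omega, ?_⟩)⟩
      have he : (c:Int) + 1 = ((c+1 : Nat) : Int) := by omega
      rw [he, pv_cellA] at hrt
      exact hrt
  · rintro ⟨c, hc4, r, hr4, hq⟩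
    refine ⟨(c : Int), by rw [PySem.List.mem_pyRange_one]; omega,
            (r : Int), by rw [PySem.List.mem_pyRange_one]; omega, ?_⟩
    simp only [Bool.or_eq_true, Bool.and_eq_true, beq_iff_eq, decide_eq_true_eq,
      pv_cellA]
    rcases hq with hz | ⟨hr3, hd⟩ | ⟨hc3, hrt⟩
    · exact Or.inl (Or.inl (Or.inl (Or.inl hz)))
    · refine Or.inl (Or.inl (Or.inr ⟨by omega, ?_⟩))
      have he : (r:Int) + 1 = ((r+1 : Nat) : Int) := by omega
      rw [he, pv_cellA]; exact hd
    · refine Or.inr ⟨by omega, ?_⟩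
      have he : (c:Int) + 1 = ((c+1 : Nat) : Int) := by omega
      rw [he, pv_cellA]; exact hrt

-- cell indices and flattened indices fire together
theorem pv_flatten (grid : List (List Int)) :
    (∃ j, 0 ≤ j ∧ j < 16 ∧ pvQ grid (j/4) (j%4)) ↔
    (∃ c, c < 4 ∧ ∃ r, r < 4 ∧ pvQ grid c r) := by
  constructor
  · rintro ⟨j, _, hj, hq⟩
    exact ⟨j/4, by omega, j%4, by omega, hq⟩
  · rintro ⟨c, hc, r, hr, hq⟩
    refine ⟨4*c+r, by omega, by omega, ?_⟩
    have h1 : (4*c+r)/4 = c := by omega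
    have h2 : (4*c+r)%4 = r := by omega
    rw [h1, h2]; exact hq

-- the two ports agree on every grid
theorem pv_ports_eq (grid : List (List Int)) : check_lost grid = check_lost_alt grid := by
  have hb : check_lost_alt grid = false ↔ ∃ c, c < 4 ∧ ∃ r, r < 4 ∧ pvQ grid c r := by
    unfold check_lost_alt
    rw [pv_scan_false grid 16 0 (by omega), pv_flatten]
  have ha := pv_A_false_iff grid
  cases h1 : check_lost grid <;> cases h2 : check_lost_alt grid
  · rfl
  · exact absurd (hb.mpr (ha.mp h1)) (by simp [h2])
  · exact absurd (ha.mpr (hb.mp h2)) (by simp [h1])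
  · rfl

-- ===== VERDICT (by name: the statement is the Claim_ definition above) =====
theorem check_lost_spec : Claim_equal_check_lost := by
  intro grid _ _
  unfold Spec_check_lost
  exact pv_ports_eq grid
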